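-- pv_equiv track=rewrite | github.com/axkusakin/z-curve | z_curve.py | splitted_genome_coordinates
-- ===== SOURCE A (Python) =====
-- def splitted_genome_coordinates(splitted_genome):
--     """Coordinates for the genome divided into sequences.
--     The function is needed in order to reduce the number of coordinates to construct the z-curve.
--     """
--     count_x, count_y, count_z = 0, 0, 0
--     coordinates = {'x': [], 'y': [], 'z': []}
--     for sequence_i, sequence in enumerate(splitted_genome):
--         for nucleotide_i in enumerate(sequence):
--             if splitted_genome[sequence_i][nucleotide_i[0]] == 'A':
--                 count_x += 1
--                 count_y += 1
--                 count_z += 1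
--             elif splitted_genome[sequence_i][nucleotide_i[0]] == 'T':
--                 count_x -= 1
--                 count_y -= 1
--                 count_z += 1
--             elif splitted_genome[sequence_i][nucleotide_i[0]] == 'G':
--                 count_x += 1
--                 count_y -= 1
--                 count_z -= 1
--             elif splitted_genome[sequence_i][nucleotide_i[0]] == 'C':
--                 count_x -= 1
--                 count_y += 1
--                 count_z -= 1
--         coordinates['x'].append(count_x * 2)
--         coordinates['y'].append(count_y * 2)
--         coordinates['z'].append(count_z * 2)
--     return coordinates
-- ===== SOURCE B (Python) =====
-- def splitted_genome_coordinates(splitted_genome):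
--     """Coordinates for the genome divided into sequences.
--
--     Tally each sequence's bases once, then combine the tallies
--     arithmetically into the three running Z-curve totals.
--     """
--     x, y, z = 0, 0, 0
--     xs, ys, zs = [], [], []
--     for sequence in splitted_genome:
--         counts = {}
--         for ch in sequence:
--             counts[ch] = counts.get(ch, 0) + 1
--         a = counts.get('A', 0)
--         t = counts.get('T', 0)
--         g = counts.get('G', 0)
--         c = counts.get('C', 0)
--         x += a - t + g - c
--         y += a - t - g + c
--         z += a + t - g - c
--         xs.append(x * 2)
--         ys.append(y * 2)
--         zs.append(z * 2)
--     return {'x': xs, 'y': ys, 'z': zs}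
-- ===== Notes on version B (the rewrite author's own statement) =====
-- stated objective: alternative
-- what changed: B replaces A's per-nucleotide 4-way branch stream-update (with A's repeated re-indexing splitted_genome[i][j] per character) by an aggregate-then-combine pass: each sequence's base tally is built once into a dict and the three per-sequence deltas are derived arithmetically from the four counts, then added to running totals.
import Mathlib
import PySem

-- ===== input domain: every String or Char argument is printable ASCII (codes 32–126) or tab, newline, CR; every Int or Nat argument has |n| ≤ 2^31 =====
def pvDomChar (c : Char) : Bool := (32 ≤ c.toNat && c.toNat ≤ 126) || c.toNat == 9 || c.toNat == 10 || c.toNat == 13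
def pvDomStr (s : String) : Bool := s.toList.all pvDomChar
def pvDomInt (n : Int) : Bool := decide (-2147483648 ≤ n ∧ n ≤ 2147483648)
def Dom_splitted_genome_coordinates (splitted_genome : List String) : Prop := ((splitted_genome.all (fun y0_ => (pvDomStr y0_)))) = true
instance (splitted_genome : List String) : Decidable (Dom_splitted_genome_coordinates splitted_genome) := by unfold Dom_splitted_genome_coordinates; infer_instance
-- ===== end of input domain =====

-- B replaces A's per-nucleotide 4-way branch stream-update by a tally-then-combine
-- pass per sequence (alternative decomposition, same cost; return value proved equal).

-- ===== PORT A =====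
-- inner loop body: A re-indexes splitted_genome[sequence_i][nucleotide_i[0]];
-- the `none` case of the lookup is unreachable (enumerate indices are in range,
-- where Python would raise), and then no branch fires, matching no-op.
def pvStepNucA (g : List String) (si : Int) (st : Int × Int × Int) (ni : Int × Char) : Int × Int × Int :=
  let c := (PySem.List.pyGet? g si).bind (fun s => PySem.Str.pyGet? s ni.1)
  if c = some 'A' then (st.1 + 1, st.2.1 + 1, st.2.2 + 1)
  else if c = some 'T' then (st.1 - 1, st.2.1 - 1, st.2.2 + 1)
  else if c = some 'G' then (st.1 + 1, st.2.1 - 1, st.2.2 - 1)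
  else if c = some 'C' then (st.1 - 1, st.2.1 + 1, st.2.2 - 1)
  else st

def pvStepSeqA (g : List String)
    (st : (Int × Int × Int) × (List Int × List Int × List Int)) (p : Int × String) :
    (Int × Int × Int) × (List Int × List Int × List Int) :=
  let cnt := (PySem.List.enumerate p.2.toList 0).foldl (pvStepNucA g p.1) st.1
  (cnt, (st.2.1 ++ [cnt.1 * 2], st.2.2.1 ++ [cnt.2.1 * 2], st.2.2.2 ++ [cnt.2.2 * 2]))

def splitted_genome_coordinates (splitted_genome : List String) : List (String × List Int) :=
  let r := (PySem.List.enumerate splitted_genome 0).foldl (pvStepSeqA splitted_genome)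
             ((0, 0, 0), ([], [], []))
  [("x", r.2.1), ("y", r.2.2.1), ("z", r.2.2.2)]

-- ===== PORT B =====
def pvDeltasB (seq : String) : Int × Int × Int :=
  let counts := seq.toList.foldl
    (fun (d : PySem.Dict Char Int) ch => d.insert ch (d.getD ch 0 + 1)) PySem.Dict.empty
  let a := counts.getD 'A' 0
  let t := counts.getD 'T' 0
  let g := counts.getD 'G' 0
  let c := counts.getD 'C' 0
  (a - t + g - c, a - t - g + c, a + t - g - c)

def pvStepSeqB (st : (Int × Int × Int) × (List Int × List Int × List Int)) (seq : String) :
    (Int × Int × Int) × (List Int × List Int × List Int) :=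
  let d := pvDeltasB seq
  let x := st.1.1 + d.1
  let y := st.1.2.1 + d.2.1
  let z := st.1.2.2 + d.2.2
  ((x, y, z), (st.2.1 ++ [x * 2], st.2.2.1 ++ [y * 2], st.2.2.2 ++ [z * 2]))

def splitted_genome_coordinates_alt (splitted_genome : List String) : List (String × List Int) :=
  let r := splitted_genome.foldl pvStepSeqB ((0, 0, 0), ([], [], []))
  [("x", r.2.1), ("y", r.2.2.1), ("z", r.2.2.2)]

-- ===== PRECONDITION & SPEC =====
def Spec_splitted_genome_coordinates (splitted_genome : List String) (out : List (String × List Int)) : Prop := out = splitted_genome_coordinates_alt splitted_genome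
instance (splitted_genome : List String) (out : List (String × List Int)) : Decidable (Spec_splitted_genome_coordinates splitted_genome out) := by unfold Spec_splitted_genome_coordinates; infer_instance

-- ===== CLAIM (what is proved, stated in full; the proofs are below) =====
def Claim_equal_splitted_genome_coordinates : Prop := ∀ (splitted_genome : List String), Dom_splitted_genome_coordinates splitted_genome → Spec_splitted_genome_coordinates splitted_genome (splitted_genome_coordinates splitted_genome)

-- ===== LEMMAS AND PROOFS =====

-- proof-side view of A's inner-loop body once the lookup has been resolved to the char
def pvCharStep (st : Int × Int × Int) (c : Char) : Int × Int × Int :=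
  if c = 'A' then (st.1 + 1, st.2.1 + 1, st.2.2 + 1)
  else if c = 'T' then (st.1 - 1, st.2.1 - 1, st.2.2 + 1)
  else if c = 'G' then (st.1 + 1, st.2.1 - 1, st.2.2 - 1)
  else if c = 'C' then (st.1 - 1, st.2.1 + 1, st.2.2 - 1)
  else st

lemma pv_inner (g : List String) (k : Nat) (str : String) (hk : g[k]? = some str) :
    ∀ (s : List Char) (j : Nat),
      (∀ i (h : i < s.length), str.toList[j + i]? = some s[i]) →
      ∀ st, (PySem.List.enumerate s (j : Int)).foldl (pvStepNucA g (k : Int)) st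
              = s.foldl pvCharStep st := by
  intro s
  induction s with
  | nil => intro j _ st; simp [PySem.List.enumerate_nil]
  | cons c s ih =>
    intro j h st
    rw [PySem.List.enumerate_cons, List.foldl_cons, List.foldl_cons]
    have hc : str.toList[j]? = some c := by simpa using h 0 (by simp)
    have hstep : pvStepNucA g (k : Int) st ((j : Int), c) = pvCharStep st c := by
      simp [pvStepNucA, pvCharStep, PySem.List.pyGet?_natCast, hk, hc]
    rw [hstep]
    have := ih (j + 1) (fun i hi => by
      have := h (i + 1) (by simpa using Nat.succ_lt_succ hi)
      simpa [Nat.add_comm, Nat.add_left_comm, Nat.add_assoc] using this)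
      (pvCharStep st c)
    simpa [Int.natCast_add] using this

lemma pv_char_fold (s : List Char) (st : Int × Int × Int) :
    s.foldl pvCharStep st =
      (st.1 + s.count 'A' - s.count 'T' + s.count 'G' - s.count 'C',
       st.2.1 + s.count 'A' - s.count 'T' - s.count 'G' + s.count 'C',
       st.2.2 + s.count 'A' + s.count 'T' - s.count 'G' - s.count 'C') := by
  induction s generalizing st with
  | nil => simp
  | cons c s ih =>
    rw [List.foldl_cons, ih]
    by_cases hA : c = 'A'
    · subst hA; simp [pvCharStep]; constructor; omega; constructor <;> omega
    · by_cases hT : c = 'T'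
      · subst hT; simp [pvCharStep, hA]; constructor; omega; constructor <;> omega
      · by_cases hG : c = 'G'
        · subst hG; simp [pvCharStep, hA, hT]; constructor; omega; constructor <;> omega
        · by_cases hC : c = 'C'
          · subst hC; simp [pvCharStep, hA, hT, hG]; constructor; omega; constructor <;> omega
          · simp [pvCharStep, hA, hT, hG, hC]

lemma pv_deltas (seq : String) :
    pvDeltasB seq =
      ((seq.toList.count 'A' : Int) - seq.toList.count 'T' + seq.toList.count 'G' - seq.toList.count 'C',
       (seq.toList.count 'A' : Int) - seq.toList.count 'T' - seq.toList.count 'G' + seq.toList.count 'C',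
       (seq.toList.count 'A' : Int) + seq.toList.count 'T' - seq.toList.count 'G' - seq.toList.count 'C') := by
  simp [pvDeltasB, PySem.Dict.getD_foldl_insert_add_one]

lemma pv_outer (G : List String) :
    ∀ (g' : List String) (k : Nat) (st : (Int × Int × Int) × (List Int × List Int × List Int)),
      (∀ i (h : i < g'.length), G[k + i]? = some g'[i]) →
      (PySem.List.enumerate g' (k : Int)).foldl (pvStepSeqA G) st = g'.foldl pvStepSeqB st := by
  intro g'
  induction g' with
  | nil => intro k st _; simp [PySem.List.enumerate_nil]
  | cons seq g' ih =>
    intro k st h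
    rw [PySem.List.enumerate_cons, List.foldl_cons, List.foldl_cons]
    have hk : G[k]? = some seq := by simpa using h 0 (by simp)
    have hstep : pvStepSeqA G st ((k : Int), seq) = pvStepSeqB st seq := by
      have hin := pv_inner G k seq hk seq.toList 0 (fun i hi => by simp) st.1
      simp only [Nat.cast_zero] at hin
      simp only [pvStepSeqA]
      rw [hin, pv_char_fold, pvStepSeqB, pv_deltas]
      obtain ⟨⟨x, y, z⟩, xs, ys, zs⟩ := st
      simp
      exact ⟨by ring, by ring, by ring⟩
    rw [hstep]
    have := ih (k + 1) (pvStepSeqB st seq) (fun i hi => by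
      have := h (i + 1) (by simpa using Nat.succ_lt_succ hi)
      simpa [Nat.add_comm, Nat.add_left_comm, Nat.add_assoc] using this)
    simpa [Int.natCast_add] using this

-- ===== VERDICT (by name: the statement is the Claim_ definition above) =====
theorem splitted_genome_coordinates_spec : Claim_equal_splitted_genome_coordinates := by
  intro g _
  unfold Spec_splitted_genome_coordinates splitted_genome_coordinates splitted_genome_coordinates_alt
  have := pv_outer g g 0 ((0, 0, 0), ([], [], [])) (fun i hi => by simp)
  simp only [Nat.cast_zero] at this
  rw [this]
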